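-- pv_equiv track=rewrite | github.com/yjainexcollo/Clinic-AI-Backend | scripts/queue_debug.py | mask_connection_string
-- ===== SOURCE A (Python) =====
-- def mask_connection_string(conn_str: str) -> str:
--     """Mask sensitive parts of connection string for display."""
--     if not conn_str:
--         return "not set"
--     try:
--         # Show format: AccountName=XXX;AccountKey=***masked***;...
--         parts = []
--         for part in conn_str.split(";"):
--             if part.startswith("AccountKey="):
--                 parts.append("AccountKey=***masked***")
--             elif part.startswith("SharedAccessKey="):
--                 parts.append("SharedAccessKey=***masked***")
--             else:
--                 parts.append(part)
--         return ";".join(parts)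
--     except Exception:
--         return "***error parsing***"
-- ===== SOURCE B (Python) =====
-- def mask_connection_string(conn_str: str) -> str:
--     """Mask sensitive parts of connection string for display."""
--     if not conn_str:
--         return "not set"
--     try:
--         # Single left-to-right character scan: no split/join, no intermediate list
--         # of segments; at each segment start test the sensitive keys, copy or mask.
--         out = []
--         i = 0
--         n = len(conn_str)
--         while i < n:
--             matched = None
--             for key in ("AccountKey=", "SharedAccessKey="):
--                 if conn_str.startswith(key, i):
--                     matched = key
--                     break
--             if matched is not None:
--                 out.append(matched + "***masked***")
--                 i += len(matched)
--                 while i < n and conn_str[i] != ";":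
--                     i += 1
--             else:
--                 while i < n and conn_str[i] != ";":
--                     out.append(conn_str[i])
--                     i += 1
--             if i < n:
--                 out.append(";")
--                 i += 1
--         return "".join(out)
--     except Exception:
--         return "***error parsing***"
-- ===== Notes on version B (the rewrite author's own statement) =====
-- stated objective: alternative
-- what changed: Replaces A's split-on-';' / per-segment branch / join pipeline with a single left-to-right character scan that masks key values in place, never materialising the list of segments.
import Mathlib
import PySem

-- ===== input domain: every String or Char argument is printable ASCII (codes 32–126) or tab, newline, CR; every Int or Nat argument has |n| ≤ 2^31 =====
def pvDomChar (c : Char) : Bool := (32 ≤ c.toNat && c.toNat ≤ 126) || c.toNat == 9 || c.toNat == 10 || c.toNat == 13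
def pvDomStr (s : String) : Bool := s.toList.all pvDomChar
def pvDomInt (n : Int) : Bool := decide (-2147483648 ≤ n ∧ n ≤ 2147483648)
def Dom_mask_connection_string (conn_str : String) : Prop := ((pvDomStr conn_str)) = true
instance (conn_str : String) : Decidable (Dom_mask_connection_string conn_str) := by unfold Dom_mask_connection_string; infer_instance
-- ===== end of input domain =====

-- B replaces A's split/branch-per-segment/join with a single left-to-right character
-- scan that masks values in place (objective: simpler one-pass traversal, no
-- intermediate segment list); A's `except` branch is unreachable, so neither port has it.

-- ===== PORT A =====
-- A: split on ';', branch on each segment (appending to `parts`), join with ';'.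
def mask_connection_string (conn_str : String) : String :=
  if conn_str.toList = [] then "not set"
  else
    let parts : List (List Char) :=
      (PySem.Chars.splitOn conn_str.toList [';']).foldl
        (fun acc part =>
          if PySem.Chars.startswith part "AccountKey=".toList then
            acc ++ ["AccountKey=***masked***".toList]
          else if PySem.Chars.startswith part "SharedAccessKey=".toList then
            acc ++ ["SharedAccessKey=***masked***".toList]
          else acc ++ [part]) []
    String.mk (PySem.Chars.join [';'] parts)

-- ===== PORT B =====
-- B's scan loop: at a segment start, either emit a masked key and skip to the next ';'
-- (drop 11 / drop 16 = len of the matched key), or copy characters up to the next ';';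
-- then emit the ';' and continue.  takeWhile/dropWhile are the two inner while-loops.
def pvMaskScan (cs : List Char) : List Char :=
  if PySem.Chars.startswith cs "AccountKey=".toList then
    match h : (cs.drop 11).dropWhile (· ≠ ';') with
    | [] => "AccountKey=***masked***".toList
    | _ :: t => "AccountKey=***masked***".toList ++ ';' :: pvMaskScan t
  else if PySem.Chars.startswith cs "SharedAccessKey=".toList then
    match h : (cs.drop 16).dropWhile (· ≠ ';') with
    | [] => "SharedAccessKey=***masked***".toList
    | _ :: t => "SharedAccessKey=***masked***".toList ++ ';' :: pvMaskScan t
  else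
    match h : cs.dropWhile (· ≠ ';') with
    | [] => cs.takeWhile (· ≠ ';')
    | _ :: t => cs.takeWhile (· ≠ ';') ++ ';' :: pvMaskScan t
termination_by cs.length
decreasing_by
  · have h3 := List.length_dropWhile_le (fun c => decide (c ≠ ';')) (cs.drop 11)
    rw [h] at h3
    have h4 := List.length_drop (l := cs) (i := 11)
    simp only [List.length_cons] at h3
    omega
  · have h3 := List.length_dropWhile_le (fun c => decide (c ≠ ';')) (cs.drop 16)
    rw [h] at h3
    have h4 := List.length_drop (l := cs) (i := 16)
    simp only [List.length_cons] at h3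
    omega
  · have h3 := List.length_dropWhile_le (fun c => decide (c ≠ ';')) cs
    rw [h] at h3
    simp only [List.length_cons] at h3
    omega

def mask_connection_string_alt (conn_str : String) : String :=
  if conn_str.toList = [] then "not set"
  else String.mk (pvMaskScan conn_str.toList)

-- ===== PRECONDITION & SPEC =====
def Spec_mask_connection_string (conn_str : String) (out : String) : Prop := out = mask_connection_string_alt conn_str
instance (conn_str : String) (out : String) : Decidable (Spec_mask_connection_string conn_str out) := by unfold Spec_mask_connection_string; infer_instance

-- ===== CLAIM (what is proved, stated in full; the proofs are below) =====
def Claim_equal_mask_connection_string : Prop := ∀ (conn_str : String), Dom_mask_connection_string conn_str → Spec_mask_connection_string conn_str (mask_connection_string conn_str)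

-- ===== LEMMAS AND PROOFS =====

-- Clean structural model of Python's str.split(';').
def pvSplitSemi : List Char → List (List Char)
  | [] => [[]]
  | c :: t =>
    if c = ';' then [] :: pvSplitSemi t
    else
      match pvSplitSemi t with
      | [] => [[c]]
      | s :: r => (c :: s) :: r

theorem pvSplitSemi_ne_nil (cs : List Char) : pvSplitSemi cs ≠ [] := by
  induction cs with
  | nil => simp [pvSplitSemi]
  | cons c t ih =>
    simp only [pvSplitSemi]
    split_ifs
    · simp
    · cases h : pvSplitSemi t <;> simp

theorem pvSplitOn_go_spec (fuel : Nat) (l cur : List Char) (acc : List (List Char))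
    (h : l.length < fuel) :
    PySem.Chars.splitOn.go [';'] fuel l cur acc
      = acc.reverse ++ (pvSplitSemi l).modifyHead (cur.reverse ++ ·) := by
  induction fuel generalizing l cur acc with
  | zero => omega
  | succ fuel ih =>
    cases l with
    | nil => simp [PySem.Chars.splitOn.go, pvSplitSemi]
    | cons c rest =>
      by_cases hc : c = ';'
      · subst hc
        have hp : [';'].isPrefixOf (';' :: rest) = true := by simp [List.isPrefixOf]
        simp only [PySem.Chars.splitOn.go, hp, if_true, List.length_cons, List.length_nil,
          List.drop_succ_cons, List.drop_zero]
        rw [ih rest [] (cur.reverse :: acc) (by simpa using Nat.lt_of_succ_lt_succ h)]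
        simp only [pvSplitSemi, List.reverse_cons, List.append_assoc,
          List.reverse_nil, List.nil_append, List.singleton_append]
        cases hsp : pvSplitSemi rest <;> simp
      · have hp : [';'].isPrefixOf (c :: rest) = false := by
          simp [List.isPrefixOf]; exact fun hcontra => hc hcontra.symm
        simp only [PySem.Chars.splitOn.go, hp, Bool.false_eq_true, if_false]
        rw [ih rest (c :: cur) acc (by simpa using Nat.lt_of_succ_lt_succ h)]
        simp only [pvSplitSemi, hc, if_false]
        rcases hsp : pvSplitSemi rest with _ | ⟨s, r⟩
        · exact absurd hsp (pvSplitSemi_ne_nil rest)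
        · simp

theorem pvSplitOn_eq (cs : List Char) :
    PySem.Chars.splitOn cs [';'] = pvSplitSemi cs := by
  unfold PySem.Chars.splitOn
  rw [pvSplitOn_go_spec (cs.length + 1) cs [] [] (by omega)]
  cases hsp : pvSplitSemi cs <;> simp

theorem pvSplitSemi_cases (cs : List Char) :
    pvSplitSemi cs
      = cs.takeWhile (· ≠ ';') ::
          (match cs.dropWhile (· ≠ ';') with
           | [] => ([] : List (List Char))
           | _ :: t => pvSplitSemi t) := by
  induction cs with
  | nil => simp [pvSplitSemi]
  | cons c t ih =>
    by_cases hc : c = ';'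
    · subst hc; simp [pvSplitSemi, List.takeWhile, List.dropWhile]
    · simp only [pvSplitSemi, hc, if_false]
      rw [ih]
      simp [List.takeWhile, List.dropWhile, hc]

-- prefix decomposition facts for a key that contains no ';'
theorem pv_take_key (key r : List Char) (hk : key.all (· ≠ ';') = true) :
    (key ++ r).takeWhile (· ≠ ';') = key ++ r.takeWhile (· ≠ ';') := by
  have ht : List.takeWhile (fun x => decide (x ≠ ';')) key = key :=
    List.takeWhile_eq_self_iff.mpr (List.all_eq_true.mp hk)
  rw [List.takeWhile_append, ht]
  simp

theorem pv_drop_key (key r : List Char) (hk : key.all (· ≠ ';') = true) :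
    (key ++ r).dropWhile (· ≠ ';') = r.dropWhile (· ≠ ';') := by
  have hd : List.dropWhile (fun x => decide (x ≠ ';')) key = [] :=
    List.dropWhile_eq_nil_iff.mpr (List.all_eq_true.mp hk)
  rw [List.dropWhile_append, hd]
  simp

-- the per-segment branch of A, as a function (what A's foldl maps over the segments)
def pvMaskPart (part : List Char) : List Char :=
  if PySem.Chars.startswith part "AccountKey=".toList then "AccountKey=***masked***".toList
  else if PySem.Chars.startswith part "SharedAccessKey=".toList then "SharedAccessKey=***masked***".toList
  else part

theorem pv_maskPart_of_not (seg cs : List Char) (hpre : seg <+: cs)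
    (h1 : ¬ PySem.Chars.startswith cs "AccountKey=".toList = true)
    (h2 : ¬ PySem.Chars.startswith cs "SharedAccessKey=".toList = true) :
    pvMaskPart seg = seg := by
  rw [pvMaskPart, if_neg, if_neg]
  · intro hc
    exact h2 ((PySem.Chars.startswith_iff _ _).mpr (((PySem.Chars.startswith_iff _ _).mp hc).trans hpre))
  · intro hc
    exact h1 ((PySem.Chars.startswith_iff _ _).mpr (((PySem.Chars.startswith_iff _ _).mp hc).trans hpre))

theorem pv_maskPart_key1 (x : List Char) :
    pvMaskPart ("AccountKey=".toList ++ x) = "AccountKey=***masked***".toList := by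
  rw [pvMaskPart, if_pos]
  exact (PySem.Chars.startswith_iff _ _).mpr (List.prefix_append _ _)

theorem pv_maskPart_key2 (x : List Char) :
    pvMaskPart ("SharedAccessKey=".toList ++ x) = "SharedAccessKey=***masked***".toList := by
  rw [pvMaskPart, if_neg, if_pos]
  · exact (PySem.Chars.startswith_iff _ _).mpr (List.prefix_append _ _)
  · intro hc
    obtain ⟨u, hu⟩ := (PySem.Chars.startswith_iff _ _).mp hc
    have := congrArg List.head? hu
    simp at this

theorem pv_join_map (cs : List Char) :
    PySem.Chars.join [';'] ((pvSplitSemi cs).map pvMaskPart)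
      = pvMaskPart (cs.takeWhile (· ≠ ';')) ++
          (match cs.dropWhile (· ≠ ';') with
           | [] => ([] : List Char)
           | _ :: t => ';' :: PySem.Chars.join [';'] ((pvSplitSemi t).map pvMaskPart)) := by
  rw [pvSplitSemi_cases cs]
  rcases hd : cs.dropWhile (· ≠ ';') with _ | ⟨x, t⟩
  · simp [PySem.Chars.join_singleton]
  · simp only
    rcases hm : (pvSplitSemi t).map pvMaskPart with _ | ⟨m, ms⟩
    · exact absurd (List.map_eq_nil_iff.mp hm) (pvSplitSemi_ne_nil t)
    · rw [List.map_cons, hm, PySem.Chars.join_cons_cons]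
      simp

-- unfolding equations of pvMaskScan, one per branch
theorem pvMaskScan_step1 (cs : List Char)
    (h1 : PySem.Chars.startswith cs "AccountKey=".toList = true)
    (hd : (cs.drop 11).dropWhile (· ≠ ';') = []) :
    pvMaskScan cs = "AccountKey=***masked***".toList := by
  rw [pvMaskScan, if_pos h1]
  split
  · rfl
  · rename_i x t hx; rw [hd] at hx; cases hx

theorem pvMaskScan_step1' (cs : List Char) (x : Char) (t : List Char)
    (h1 : PySem.Chars.startswith cs "AccountKey=".toList = true)
    (hd : (cs.drop 11).dropWhile (· ≠ ';') = x :: t) :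
    pvMaskScan cs = "AccountKey=***masked***".toList ++ ';' :: pvMaskScan t := by
  rw [pvMaskScan, if_pos h1]
  split
  · rename_i hx; rw [hd] at hx; cases hx
  · rename_i y s hx; rw [hd] at hx; cases hx; rfl

theorem pvMaskScan_step2 (cs : List Char)
    (h1 : ¬ PySem.Chars.startswith cs "AccountKey=".toList = true)
    (h2 : PySem.Chars.startswith cs "SharedAccessKey=".toList = true)
    (hd : (cs.drop 16).dropWhile (· ≠ ';') = []) :
    pvMaskScan cs = "SharedAccessKey=***masked***".toList := by
  rw [pvMaskScan, if_neg h1, if_pos h2]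
  split
  · rfl
  · rename_i x t hx; rw [hd] at hx; cases hx

theorem pvMaskScan_step2' (cs : List Char) (x : Char) (t : List Char)
    (h1 : ¬ PySem.Chars.startswith cs "AccountKey=".toList = true)
    (h2 : PySem.Chars.startswith cs "SharedAccessKey=".toList = true)
    (hd : (cs.drop 16).dropWhile (· ≠ ';') = x :: t) :
    pvMaskScan cs = "SharedAccessKey=***masked***".toList ++ ';' :: pvMaskScan t := by
  rw [pvMaskScan, if_neg h1, if_pos h2]
  split
  · rename_i hx; rw [hd] at hx; cases hx
  · rename_i y s hx; rw [hd] at hx; cases hx; rfl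

theorem pvMaskScan_step3 (cs : List Char)
    (h1 : ¬ PySem.Chars.startswith cs "AccountKey=".toList = true)
    (h2 : ¬ PySem.Chars.startswith cs "SharedAccessKey=".toList = true)
    (hd : cs.dropWhile (· ≠ ';') = []) :
    pvMaskScan cs = cs.takeWhile (· ≠ ';') := by
  rw [pvMaskScan, if_neg h1, if_neg h2]
  split
  · rfl
  · rename_i x t hx; rw [hd] at hx; cases hx

theorem pvMaskScan_step3' (cs : List Char) (x : Char) (t : List Char)
    (h1 : ¬ PySem.Chars.startswith cs "AccountKey=".toList = true)
    (h2 : ¬ PySem.Chars.startswith cs "SharedAccessKey=".toList = true)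
    (hd : cs.dropWhile (· ≠ ';') = x :: t) :
    pvMaskScan cs = cs.takeWhile (· ≠ ';') ++ ';' :: pvMaskScan t := by
  rw [pvMaskScan, if_neg h1, if_neg h2]
  split
  · rename_i hx; rw [hd] at hx; cases hx
  · rename_i y s hx; rw [hd] at hx; cases hx; rfl

theorem pvMaskScan_eq (cs : List Char) :
    pvMaskScan cs = PySem.Chars.join [';'] ((pvSplitSemi cs).map pvMaskPart) := by
  induction cs using pvMaskScan.induct with
  | case1 cs h1 hd =>
    have hd' : cs.dropWhile (· ≠ ';') = [] := by
      obtain ⟨r, rfl⟩ := (PySem.Chars.startswith_iff _ _).mp h1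
      rw [pv_drop_key _ _ (by decide)]
      rw [List.drop_left' (show ("AccountKey=".toList).length = 11 by decide)] at hd
      exact hd
    have hseg : pvMaskPart (cs.takeWhile (· ≠ ';')) = "AccountKey=***masked***".toList := by
      obtain ⟨r, rfl⟩ := (PySem.Chars.startswith_iff _ _).mp h1
      rw [pv_take_key _ _ (by decide), pv_maskPart_key1]
    rw [pvMaskScan_step1 cs h1 hd, pv_join_map, hd', hseg]
    simp
  | case2 cs h1 x t hd ih =>
    have hd' : cs.dropWhile (· ≠ ';') = x :: t := by
      obtain ⟨r, rfl⟩ := (PySem.Chars.startswith_iff _ _).mp h1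
      rw [pv_drop_key _ _ (by decide)]
      rw [List.drop_left' (show ("AccountKey=".toList).length = 11 by decide)] at hd
      exact hd
    have hseg : pvMaskPart (cs.takeWhile (· ≠ ';')) = "AccountKey=***masked***".toList := by
      obtain ⟨r, rfl⟩ := (PySem.Chars.startswith_iff _ _).mp h1
      rw [pv_take_key _ _ (by decide), pv_maskPart_key1]
    rw [pvMaskScan_step1' cs x t h1 hd, pv_join_map, hd', hseg, ih]
  | case3 cs h1 h2 hd =>
    have hd' : cs.dropWhile (· ≠ ';') = [] := by
      obtain ⟨r, rfl⟩ := (PySem.Chars.startswith_iff _ _).mp h2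
      rw [pv_drop_key _ _ (by decide)]
      rw [List.drop_left' (show ("SharedAccessKey=".toList).length = 16 by decide)] at hd
      exact hd
    have hseg : pvMaskPart (cs.takeWhile (· ≠ ';')) = "SharedAccessKey=***masked***".toList := by
      obtain ⟨r, rfl⟩ := (PySem.Chars.startswith_iff _ _).mp h2
      rw [pv_take_key _ _ (by decide), pv_maskPart_key2]
    rw [pvMaskScan_step2 cs h1 h2 hd, pv_join_map, hd', hseg]
    simp
  | case4 cs h1 h2 x t hd ih =>
    have hd' : cs.dropWhile (· ≠ ';') = x :: t := by
      obtain ⟨r, rfl⟩ := (PySem.Chars.startswith_iff _ _).mp h2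
      rw [pv_drop_key _ _ (by decide)]
      rw [List.drop_left' (show ("SharedAccessKey=".toList).length = 16 by decide)] at hd
      exact hd
    have hseg : pvMaskPart (cs.takeWhile (· ≠ ';')) = "SharedAccessKey=***masked***".toList := by
      obtain ⟨r, rfl⟩ := (PySem.Chars.startswith_iff _ _).mp h2
      rw [pv_take_key _ _ (by decide), pv_maskPart_key2]
    rw [pvMaskScan_step2' cs x t h1 h2 hd, pv_join_map, hd', hseg, ih]
  | case5 cs h1 h2 hd =>
    rw [pvMaskScan_step3 cs h1 h2 hd, pv_join_map, hd,
      pv_maskPart_of_not _ cs (List.takeWhile_prefix _) h1 h2]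
    simp
  | case6 cs h1 h2 x t hd ih =>
    rw [pvMaskScan_step3' cs x t h1 h2 hd, pv_join_map, hd,
      pv_maskPart_of_not _ cs (List.takeWhile_prefix _) h1 h2, ih]

theorem pv_fold_fun_eq :
    (fun (acc : List (List Char)) part =>
        if PySem.Chars.startswith part "AccountKey=".toList then
          acc ++ ["AccountKey=***masked***".toList]
        else if PySem.Chars.startswith part "SharedAccessKey=".toList then
          acc ++ ["SharedAccessKey=***masked***".toList]
        else acc ++ [part])
      = fun acc part => acc ++ [pvMaskPart part] := by
  funext acc part
  simp only [pvMaskPart]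
  split_ifs <;> rfl

-- ===== VERDICT (by name: the statement is the Claim_ definition above) =====
theorem mask_connection_string_spec : Claim_equal_mask_connection_string := by
  intro conn_str _
  unfold Spec_mask_connection_string mask_connection_string mask_connection_string_alt
  by_cases h : conn_str.toList = []
  · simp [h]
  · simp only [h, if_false]
    rw [pv_fold_fun_eq, PySem.List.foldl_append_singleton_eq_map, pvSplitOn_eq, pvMaskScan_eq]
    rw [List.nil_append]
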